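-- pv_equiv track=rewrite | github.com/SamuelHanono/devin-sheriff | devin_sheriff/dashboard.py | analyze_risk_level
-- ===== SOURCE A (Python) =====
-- def analyze_risk_level(files_to_change: list) -> tuple:
--     """
--     Analyze the risk level based on files being changed.
--     Returns (risk_level, risk_color, risk_description)
--     """
--     if not files_to_change:
--         return ("UNKNOWN", "gray", "No files specified in plan")
--
--     high_risk_patterns = [
--         'config.py', '.env', 'secrets', 'credentials', 'auth',
--         'password', 'token', 'key', 'private', 'secret',
--         'settings.py', 'config.json', 'config.yaml', 'config.yml',
--         '.pem', '.key', 'oauth', 'jwt'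
--     ]
--
--     medium_risk_patterns = [
--         'main.py', 'models.py', 'app.py', 'database', 'db.py',
--         'core/', 'src/main', 'index.py', 'server.py', 'api.py',
--         'routes.py', 'views.py', 'schema', 'migration'
--     ]
--
--     low_risk_patterns = [
--         'readme', 'test', '.txt', '.md', 'docs/', 'doc/',
--         'example', 'sample', '.rst', 'changelog', 'license',
--         'contributing', '.gitignore', 'requirements.txt'
--     ]
--
--     files_lower = [f.lower() for f in files_to_change]
--
--     for file in files_lower:
--         for pattern in high_risk_patterns:
--             if pattern in file:
--                 return ("HIGH", "red", f"Touches sensitive file: {file}")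
--
--     for file in files_lower:
--         for pattern in medium_risk_patterns:
--             if pattern in file:
--                 return ("MEDIUM", "orange", f"Modifies core logic: {file}")
--
--     for file in files_lower:
--         for pattern in low_risk_patterns:
--             if pattern in file:
--                 return ("LOW", "green", "Only touches docs/tests")
--
--     return ("MEDIUM", "orange", "Standard code changes")
-- ===== SOURCE B (Python) =====
-- HIGH_PATTERNS = ['config.py', '.env', 'secrets', 'credentials', 'auth',
--                  'password', 'token', 'key', 'private', 'secret',
--                  'settings.py', 'config.json', 'config.yaml', 'config.yml',
--                  '.pem', '.key', 'oauth', 'jwt']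
-- MEDIUM_PATTERNS = ['main.py', 'models.py', 'app.py', 'database', 'db.py',
--                    'core/', 'src/main', 'index.py', 'server.py', 'api.py',
--                    'routes.py', 'views.py', 'schema', 'migration']
-- LOW_PATTERNS = ['readme', 'test', '.txt', '.md', 'docs/', 'doc/',
--                 'example', 'sample', '.rst', 'changelog', 'license',
--                 'contributing', '.gitignore', 'requirements.txt']
--
--
-- def analyze_risk_level(files_to_change: list) -> tuple:
--     """Single pass: classify each file once (high=0, medium=1, low=2),
--     keep the earliest file at the best (smallest) level seen."""
--     if not files_to_change:
--         return ("UNKNOWN", "gray", "No files specified in plan")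
--     best_level = None
--     best_file = None
--     for f in files_to_change:
--         fl = f.lower()
--         if any(p in fl for p in HIGH_PATTERNS):
--             level = 0
--         elif any(p in fl for p in MEDIUM_PATTERNS):
--             level = 1
--         elif any(p in fl for p in LOW_PATTERNS):
--             level = 2
--         else:
--             continue
--         if best_level is None or level < best_level:
--             best_level, best_file = level, fl
--     if best_level == 0:
--         return ("HIGH", "red", f"Touches sensitive file: {best_file}")
--     if best_level == 1:
--         return ("MEDIUM", "orange", f"Modifies core logic: {best_file}")
--     if best_level == 2:
--         return ("LOW", "green", "Only touches docs/tests")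
--     return ("MEDIUM", "orange", "Standard code changes")
-- ===== Notes on version B (the rewrite author's own statement) =====
-- stated objective: alternative
-- what changed: A runs three sequential scans of the file list (high, then medium, then low patterns); B classifies each file once in a single pass, tracking the best (lowest) risk level and the earliest file that reached it.
import Mathlib
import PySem

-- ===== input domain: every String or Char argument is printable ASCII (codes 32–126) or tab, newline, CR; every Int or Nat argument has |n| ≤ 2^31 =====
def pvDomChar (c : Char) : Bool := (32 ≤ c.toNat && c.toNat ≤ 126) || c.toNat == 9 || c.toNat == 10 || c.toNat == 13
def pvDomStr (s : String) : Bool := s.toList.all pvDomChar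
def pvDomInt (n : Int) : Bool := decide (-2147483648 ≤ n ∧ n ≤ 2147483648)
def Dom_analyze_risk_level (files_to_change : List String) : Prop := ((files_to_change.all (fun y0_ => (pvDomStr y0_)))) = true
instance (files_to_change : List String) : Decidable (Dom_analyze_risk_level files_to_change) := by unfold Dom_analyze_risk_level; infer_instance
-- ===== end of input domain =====

-- B replaces A's three sequential scans with one pass keeping the best (lowest) risk level
-- seen so far (objective: alternative single-pass decomposition, same asymptotic cost).

-- shared pattern tables (literal constants of both Pythons)
def pvHigh : List String :=
  ["config.py", ".env", "secrets", "credentials", "auth",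
   "password", "token", "key", "private", "secret",
   "settings.py", "config.json", "config.yaml", "config.yml",
   ".pem", ".key", "oauth", "jwt"]

def pvMed : List String :=
  ["main.py", "models.py", "app.py", "database", "db.py",
   "core/", "src/main", "index.py", "server.py", "api.py",
   "routes.py", "views.py", "schema", "migration"]

def pvLow : List String :=
  ["readme", "test", ".txt", ".md", "docs/", "doc/",
   "example", "sample", ".rst", "changelog", "license",
   "contributing", ".gitignore", "requirements.txt"]

-- 'any(pattern in file for pattern in pats)'
def pvHits (pats : List String) (f : String) : Bool :=
  pats.any (fun p => PySem.Str.isIn p f)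

-- ===== PORT A =====
def analyze_risk_level (files_to_change : List String) : String × String × String :=
  if files_to_change = [] then ("UNKNOWN", "gray", "No files specified in plan")
  else
    let files_lower := files_to_change.map PySem.Str.lower
    match files_lower.find? (pvHits pvHigh) with
    | some file => ("HIGH", "red", "Touches sensitive file: " ++ file)
    | none =>
      match files_lower.find? (pvHits pvMed) with
      | some file => ("MEDIUM", "orange", "Modifies core logic: " ++ file)
      | none =>
        match files_lower.find? (pvHits pvLow) with
        | some _ => ("LOW", "green", "Only touches docs/tests")
        | none => ("MEDIUM", "orange", "Standard code changes")

-- ===== PORT B =====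
-- level of one lowered file: high=0, medium=1, low=2, none otherwise
def pvLevel (fl : String) : Option Nat :=
  if pvHits pvHigh fl then some 0
  else if pvHits pvMed fl then some 1
  else if pvHits pvLow fl then some 2
  else none

-- loop body: update (best_level, best_file) only on a strictly smaller level
def pvStep (best : Option (Nat × String)) (f : String) : Option (Nat × String) :=
  let fl := PySem.Str.lower f
  match pvLevel fl with
  | none => best
  | some l =>
      match best with
      | none => some (l, fl)
      | some (bl, bf) => if l < bl then some (l, fl) else some (bl, bf)

def analyze_risk_level_alt (files_to_change : List String) : String × String × String :=
  if files_to_change = [] then ("UNKNOWN", "gray", "No files specified in plan")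
  else
    match files_to_change.foldl pvStep none with
    | some (0, file) => ("HIGH", "red", "Touches sensitive file: " ++ file)
    | some (1, file) => ("MEDIUM", "orange", "Modifies core logic: " ++ file)
    | some (2, _) => ("LOW", "green", "Only touches docs/tests")
    | _ => ("MEDIUM", "orange", "Standard code changes")

-- ===== PRECONDITION & SPEC =====
def Spec_analyze_risk_level (files_to_change : List String) (out : String × String × String) : Prop := out = analyze_risk_level_alt files_to_change
instance (files_to_change : List String) (out : String × String × String) : Decidable (Spec_analyze_risk_level files_to_change out) := by unfold Spec_analyze_risk_level; infer_instance

-- ===== CLAIM (what is proved, stated in full; the proofs are below) =====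
def Claim_equal_analyze_risk_level : Prop := ∀ (files_to_change : List String), Dom_analyze_risk_level files_to_change → Spec_analyze_risk_level files_to_change (analyze_risk_level files_to_change)

-- ===== LEMMAS AND PROOFS =====

-- left-biased 'keep the strictly smaller level' combine
def pvMerge (a b : Option (Nat × String)) : Option (Nat × String) :=
  match a, b with
  | none, b => b
  | a, none => a
  | some (al, af), some (bl, bf) => if bl < al then some (bl, bf) else some (al, af)

-- level/file pair of an already-lowered string
def pvLevelPair (fl : String) : Option (Nat × String) :=
  (pvLevel fl).map (fun l => (l, fl))

theorem pvStep_eq (best : Option (Nat × String)) (f : String) :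
    pvStep best f = pvMerge best (pvLevelPair (PySem.Str.lower f)) := by
  unfold pvStep pvLevelPair pvMerge
  cases hl : pvLevel (PySem.Str.lower f) <;> cases best <;> simp [hl]

theorem pvMerge_assoc (a b c : Option (Nat × String)) :
    pvMerge (pvMerge a b) c = pvMerge a (pvMerge b c) := by
  rcases a with _ | ⟨al, af⟩ <;> rcases b with _ | ⟨bl, bf⟩ <;> rcases c with _ | ⟨cl, cf⟩ <;>
    simp only [pvMerge] <;> split_ifs <;>
      first
        | rfl
        | (exfalso; omega)
        | (simp only [pvMerge] <;> split_ifs <;> first | rfl | (exfalso; omega))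

-- the value of A's three sequential scans, as one function of the lowered list
def pvCascade (fl : List String) : Option (Nat × String) :=
  match fl.find? (pvHits pvHigh) with
  | some f => some (0, f)
  | none =>
    match fl.find? (pvHits pvMed) with
    | some f => some (1, f)
    | none =>
      match fl.find? (pvHits pvLow) with
      | some f => some (2, f)
      | none => none

theorem pvCascade_cons (f : String) (fl : List String) :
    pvCascade (f :: fl) = pvMerge (pvLevelPair f) (pvCascade fl) := by
  unfold pvCascade pvLevelPair pvLevel
  by_cases h1 : pvHits pvHigh f = true <;>
    by_cases h2 : pvHits pvMed f = true <;>
      by_cases h3 : pvHits pvLow f = true <;>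
        simp [List.find?, h1, h2, h3] <;>
          cases hh : fl.find? (pvHits pvHigh) <;>
            cases hm : fl.find? (pvHits pvMed) <;>
              cases hl : fl.find? (pvHits pvLow) <;>
                simp [pvMerge]

theorem pvFoldl_merge (fs : List String) (acc : Option (Nat × String)) :
    fs.foldl pvStep acc = pvMerge acc (pvCascade (fs.map PySem.Str.lower)) := by
  induction fs generalizing acc with
  | nil =>
    simp [pvCascade]
    cases acc <;> simp [pvMerge]
  | cons f fs ih =>
    simp only [List.foldl_cons, List.map_cons]
    rw [ih, pvStep_eq, pvCascade_cons, pvMerge_assoc]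

-- ===== VERDICT (by name: the statement is the Claim_ definition above) =====
theorem analyze_risk_level_spec : Claim_equal_analyze_risk_level := by
  intro files _
  unfold Spec_analyze_risk_level analyze_risk_level analyze_risk_level_alt
  by_cases hnil : files = []
  · simp [hnil]
  · simp only [hnil, if_false]
    rw [pvFoldl_merge]
    have hml : pvMerge none (pvCascade (files.map PySem.Str.lower)) = pvCascade (files.map PySem.Str.lower) := by
      cases pvCascade (files.map PySem.Str.lower) <;> rfl
    rw [hml]
    unfold pvCascade
    cases hh : (files.map PySem.Str.lower).find? (pvHits pvHigh) <;>
      cases hm : (files.map PySem.Str.lower).find? (pvHits pvMed) <;>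
        cases hl : (files.map PySem.Str.lower).find? (pvHits pvLow) <;> simp
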